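-- pv_equiv track=rewrite | github.com/ericmerle3789/Collatz-Junction-Theorem | scripts/research/r12_algebraic_structure.py | compute_sigma_g_form
-- ===== SOURCE A (Python) =====
-- def modinv(a, m):
--     """Modular inverse of a mod m. Returns None if gcd != 1."""
--     if m == 1:
--         return 0
--     g, x, _ = _extended_gcd(a % m, m)
--     if g != 1:
--         return None
--     return x % m
--
-- def _extended_gcd(a, b):
--     """Extended Euclidean algorithm."""
--     if a == 0:
--         return b, 0, 1
--     g, x, y = _extended_gcd(b % a, a)
--     return g, y - (b // a) * x, x
--
-- def compute_sigma_g_form(A_seq, k, p):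
--     """
--     sigma(A) = sum_{j=0}^{k-1} g^j * 2^{A_j - j}  mod p
--     where g = 2 * 3^{-1} mod p.
--
--     Note: A_j >= j always (since 0 = A_0 < A_1 < ... and each A_j >= j).
--     So A_j - j >= 0 always, and 2^{A_j - j} is well-defined.
--     """
--     inv3 = modinv(3, p)
--     if inv3 is None:
--         return None
--     g = (2 * inv3) % p
--     result = 0
--     for j in range(k):
--         aj = A_seq[j]
--         # g^j * 2^{A_j - j}
--         term = (pow(g, j, p) * pow(2, aj - j, p)) % p
--         result = (result + term) % p
--     return result
-- ===== SOURCE B (Python) =====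
-- def modinv(a, m):
--     """Modular inverse of a mod m. Returns None if gcd != 1."""
--     if m == 1:
--         return 0
--     g, x, _ = _extended_gcd(a % m, m)
--     if g != 1:
--         return None
--     return x % m
--
-- def _extended_gcd(a, b):
--     """Extended Euclidean algorithm."""
--     if a == 0:
--         return b, 0, 1
--     g, x, y = _extended_gcd(b % a, a)
--     return g, y - (b // a) * x, x
--
-- def compute_sigma_g_form(A_seq, k, p):
--     """
--     sigma(A) = sum_{j=0}^{k-1} g^j * 2^{A_j - j} mod p, with g = 2 * 3^{-1} mod p.
--     Uses g^j * 2^{A_j - j} = 2^{A_j} * (3^{-1})^j mod p and keeps a running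
--     power of 3^{-1} instead of recomputing pow(g, j, p) each iteration.
--     """
--     inv3 = modinv(3, p)
--     if inv3 is None:
--         return None
--     result = 0
--     inv3_pow = 1
--     for j in range(k):
--         result = (result + pow(2, A_seq[j], p) * inv3_pow) % p
--         inv3_pow = (inv3_pow * inv3) % p
--     return result
-- ===== Notes on version B (the rewrite author's own statement) =====
-- stated objective: simpler
-- what changed: B folds the two power-of-two factors into a single pow(2, A_j, p) via the identity g^j*2^(A_j-j) = 2^(A_j)*(3^-1)^j and maintains an incremental running power of inv3 instead of recomputing pow(g, j, p) from scratch every iteration.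
-- outside the precondition, e.g. on compute_sigma_g_form([-1], 1, 5): A returns 3, B returns 3; on compute_sigma_g_form([0], 2, 5): A raises IndexError, B raises IndexError; on compute_sigma_g_form([], 1, 0): A raises ZeroDivisionError, B raises ZeroDivisionError
import Mathlib
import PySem

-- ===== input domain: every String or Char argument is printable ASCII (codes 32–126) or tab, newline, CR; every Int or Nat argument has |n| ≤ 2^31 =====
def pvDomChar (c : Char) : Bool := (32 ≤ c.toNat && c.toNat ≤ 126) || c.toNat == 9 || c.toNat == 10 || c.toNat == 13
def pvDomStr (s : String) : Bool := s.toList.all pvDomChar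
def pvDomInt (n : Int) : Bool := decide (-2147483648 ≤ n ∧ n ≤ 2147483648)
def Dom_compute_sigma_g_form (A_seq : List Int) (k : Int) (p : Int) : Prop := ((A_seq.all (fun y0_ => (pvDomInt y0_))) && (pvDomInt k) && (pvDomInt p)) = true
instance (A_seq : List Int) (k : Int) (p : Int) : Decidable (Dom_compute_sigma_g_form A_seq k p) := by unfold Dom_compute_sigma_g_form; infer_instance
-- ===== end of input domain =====

-- B replaces the per-term pow(g, j, p) * pow(2, A_j - j, p) by pow(2, A_j, p) times an
-- incrementally maintained running power of 3^{-1} (identity g^j·2^{A_j−j} = 2^{A_j}·(3^{-1})^j mod p).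

-- ===== PORT A =====
-- termination helper for the Euclidean recursion (cited by extGcd's decreasing_by)
theorem pvModNatAbsLt (b : Int) {a : Int} (ha : a ≠ 0) :
    (PySem.Int.mod b a).natAbs < a.natAbs := by
  rcases lt_or_gt_of_ne ha with h | h
  · have := PySem.Int.mod_neg_bounds b h
    omega
  · have h1 := PySem.Int.mod_nonneg b h
    have h2 := PySem.Int.mod_lt b h
    omega

-- _extended_gcd(a, b), recursion exactly as in Python (Python % and // are fmod/fdiv)
def extGcd (a b : Int) : Int × Int × Int :=
  if h : a = 0 then (b, 0, 1)
  else
    let r := extGcd (PySem.Int.mod b a) a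
    (r.1, r.2.2 - (PySem.Int.floordiv b a) * r.2.1, r.2.1)
termination_by a.natAbs
decreasing_by exact pvModNatAbsLt b h

-- modinv(a, m); total for m ≠ 0 (Pre_ excludes m = p = 0, where Python raises ZeroDivisionError)
def modinv (a m : Int) : Option Int :=
  if m = 1 then some 0
  else
    let r := extGcd (PySem.Int.mod a m) m
    if r.1 ≠ 1 then none else some (PySem.Int.mod r.2.1 m)

-- the loop of A: result = (result + (pow(g,j,p) * pow(2, A_j - j, p)) % p) % p
-- (exponents ported with .toNat: exact since Pre_ guarantees A_j ≥ j ≥ 0)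
def compute_sigma_g_form (A_seq : List Int) (k : Int) (p : Int) : Option Int :=
  match modinv 3 p with
  | none => none
  | some inv3 =>
    let g := PySem.Int.mod (2 * inv3) p
    some ((PySem.List.pyRange 0 k).foldl
      (fun result j =>
        let aj := PySem.List.pyGetD A_seq j 0
        let term := PySem.Int.mod (PySem.Int.powMod g j.toNat p * PySem.Int.powMod 2 (aj - j).toNat p) p
        PySem.Int.mod (result + term) p) 0)

-- ===== PORT B =====
-- the loop of B keeps the pair (result, inv3_pow); exponent A_j ported with .toNat (A_j ≥ 0 under Pre_)
def compute_sigma_g_form_alt (A_seq : List Int) (k : Int) (p : Int) : Option Int :=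
  match modinv 3 p with
  | none => none
  | some inv3 =>
    some (((PySem.List.pyRange 0 k).foldl
      (fun (s : Int × Int) j =>
        (PySem.Int.mod (s.1 + PySem.Int.powMod 2 (PySem.List.pyGetD A_seq j 0).toNat p * s.2) p,
         PySem.Int.mod (s.2 * inv3) p)) (0, 1)).1)

-- ===== PRECONDITION & SPEC =====
-- Pre_ excludes p = 0 (A raises ZeroDivisionError) and, when the loop actually runs (3 and p
-- coprime, p positive), k > len(A_seq) (IndexError when the loop reaches the end) and sequences
-- violating the function's documented natural-domain invariant A_j >= j (A's own docstring:
-- "A_j >= j always"): outside it pow gets a negative exponent, which raises ValueError for even p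
-- and which the ports' nonnegative-exponent arithmetic does not model (for odd p A and B still
-- return the same value there).
def Pre_compute_sigma_g_form (A_seq : List Int) (k : Int) (p : Int) : Prop :=
  p ≠ 0 ∧ (p < 0 ∨ (3 ∣ p ∧ p ≠ 1) ∨
    (k ≤ A_seq.length ∧ ∀ j : Nat, j < k.toNat → (j : Int) ≤ A_seq.getD j 0))

instance (A_seq : List Int) (k : Int) (p : Int) : Decidable (Pre_compute_sigma_g_form A_seq k p) := by
  unfold Pre_compute_sigma_g_form; infer_instance

def pvWitness_compute_sigma_g_form : List Int × Int × Int := ([0, 3, 4], 3, 7)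

def Spec_compute_sigma_g_form (A_seq : List Int) (k : Int) (p : Int) (out : Option Int) : Prop := out = compute_sigma_g_form_alt A_seq k p
instance (A_seq : List Int) (k : Int) (p : Int) (out : Option Int) : Decidable (Spec_compute_sigma_g_form A_seq k p out) := by unfold Spec_compute_sigma_g_form; infer_instance

-- ===== CLAIM (what is proved, stated in full; the proofs are below) =====
def Claim_equal_compute_sigma_g_form : Prop := ∀ (A_seq : List Int) (k : Int) (p : Int), Dom_compute_sigma_g_form A_seq k p → Pre_compute_sigma_g_form A_seq k p → Spec_compute_sigma_g_form A_seq k p (compute_sigma_g_form A_seq k p)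

-- ===== LEMMAS AND PROOFS =====

-- Python's % (fmod) depends only on the residue class of its first argument
theorem pvFmodCongr {p x y : Int} (h : x ≡ y [ZMOD p]) :
    PySem.Int.mod x p = PySem.Int.mod y p := by
  have hx : x % p = y % p := h
  show x.fmod p = y.fmod p
  rw [Int.fmod_eq_emod, Int.fmod_eq_emod, hx]
  have : (p ∣ x) ↔ (p ∣ y) := by
    rw [Int.dvd_iff_emod_eq_zero, Int.dvd_iff_emod_eq_zero, hx]
  by_cases h0 : 0 ≤ p <;> simp [h0, this]

theorem pvFmodModEq (p x : Int) : PySem.Int.mod x p ≡ x [ZMOD p] := by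
  show x.fmod p ≡ x [ZMOD p]
  rw [Int.fmod_def]
  calc x - p * x.fdiv p ≡ x - 0 [ZMOD p] :=
        (Int.ModEq.refl x).sub (Int.modEq_zero_iff_dvd.2 ⟨x.fdiv p, rfl⟩)
    _ = x := by ring

-- main loop invariant: over range(n) B's first component equals A's accumulator,
-- and B's running power is congruent to inv3^n mod p
theorem pvLoopInv (A_seq : List Int) (p inv3 : Int) (n : Nat)
    (hA : ∀ j : Nat, j < n → (j : Int) ≤ A_seq.getD j 0) :
    ((List.range n).foldl
      (fun (s : Int × Int) (j : Nat) =>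
        (PySem.Int.mod (s.1 + PySem.Int.powMod 2 (PySem.List.pyGetD A_seq (j : Int) 0).toNat p * s.2) p,
         PySem.Int.mod (s.2 * inv3) p)) (0, 1)).1
    = (List.range n).foldl
      (fun result (j : Nat) =>
        let aj := PySem.List.pyGetD A_seq (j : Int) 0
        let term := PySem.Int.mod (PySem.Int.powMod (PySem.Int.mod (2 * inv3) p) (j : Int).toNat p * PySem.Int.powMod 2 (aj - (j : Int)).toNat p) p
        PySem.Int.mod (result + term) p) 0
    ∧ ((List.range n).foldl
      (fun (s : Int × Int) (j : Nat) =>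
        (PySem.Int.mod (s.1 + PySem.Int.powMod 2 (PySem.List.pyGetD A_seq (j : Int) 0).toNat p * s.2) p,
         PySem.Int.mod (s.2 * inv3) p)) (0, 1)).2 ≡ inv3 ^ n [ZMOD p] := by
  induction n with
  | zero => simp
  | succ m ih =>
    obtain ⟨ih1, ih2⟩ := ih (fun j hj => hA j (Nat.lt_succ_of_lt hj))
    have haj : (m : Int) ≤ A_seq.getD m 0 := hA m (Nat.lt_succ_self m)
    rw [List.range_succ, List.foldl_append, List.foldl_append]
    simp only [List.foldl_cons, List.foldl_nil]
    rw [ih1]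
    constructor
    · -- the two new accumulators are equal
      apply pvFmodCongr
      apply Int.ModEq.add_left
      -- exponent bookkeeping: pyGetD at a natCast index, and (aj - m).toNat + m = aj.toNat
      rw [PySem.List.pyGetD_natCast]
      set aj := A_seq.getD m 0 with haj_def
      have htn : ((m : Int)).toNat = m := Int.toNat_natCast m
      have hsplit : aj.toNat = (aj - (m : Int)).toNat + m := by omega
      simp only [PySem.Int.powMod, htn]
      calc PySem.Int.mod ((2:Int) ^ aj.toNat) p *
            ((List.range m).foldl
              (fun (s : Int × Int) (j : Nat) =>
                (PySem.Int.mod (s.1 + PySem.Int.powMod 2 (PySem.List.pyGetD A_seq (j : Int) 0).toNat p * s.2) p,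
                 PySem.Int.mod (s.2 * inv3) p)) (0, 1)).2
          ≡ (2 : Int) ^ aj.toNat * inv3 ^ m [ZMOD p] := (pvFmodModEq p _).mul ih2
        _ = (2 * inv3) ^ m * 2 ^ (aj - (m : Int)).toNat := by rw [hsplit]; ring
        _ ≡ PySem.Int.mod (2 * inv3) p ^ m * PySem.Int.mod ((2:Int) ^ (aj - (m : Int)).toNat) p [ZMOD p] :=
            ((pvFmodModEq p (2 * inv3)).symm.pow m).mul (pvFmodModEq p _).symm
        _ ≡ PySem.Int.mod (PySem.Int.mod (2 * inv3) p ^ m) p * PySem.Int.mod ((2:Int) ^ (aj - (m : Int)).toNat) p [ZMOD p] :=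
            Int.ModEq.mul_right _ (pvFmodModEq p _).symm
        _ ≡ PySem.Int.mod (PySem.Int.mod (PySem.Int.mod (2 * inv3) p ^ m) p * PySem.Int.mod ((2:Int) ^ (aj - (m : Int)).toNat) p) p [ZMOD p] :=
            (pvFmodModEq p _).symm
    · -- the running power stays congruent to inv3^(m+1)
      calc PySem.Int.mod (_ * inv3) p ≡ _ * inv3 [ZMOD p] := pvFmodModEq p _
        _ ≡ inv3 ^ m * inv3 [ZMOD p] := ih2.mul_right inv3
        _ = inv3 ^ (m + 1) := by ring

-- pyRange 0 k for k ≤ 0 is empty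
theorem pvRangeNonpos {k : Int} (hk : k ≤ 0) : PySem.List.pyRange 0 k = [] := by
  apply List.eq_nil_iff_forall_not_mem.2
  intro x hx
  rw [PySem.List.mem_pyRange_one] at hx
  omega

-- for a ≤ 0 and b < 0 the extended gcd's first component stays negative
theorem pvExtGcdNeg : ∀ (n : Nat) (a b : Int), a.natAbs ≤ n → a ≤ 0 → b < 0 → (extGcd a b).1 < 0 := by
  intro n
  induction n with
  | zero =>
    intro a b hn ha hb
    have : a = 0 := by omega
    rw [extGcd, dif_pos this]
    exact hb
  | succ m ih =>
    intro a b hn ha hb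
    by_cases h0 : a = 0
    · rw [extGcd, dif_pos h0]; exact hb
    · rw [extGcd, dif_neg h0]
      have hlt : a < 0 := lt_of_le_of_ne ha h0
      have hb1 := PySem.Int.mod_neg_bounds b hlt
      have habs := pvModNatAbsLt b h0
      exact ih (PySem.Int.mod b a) a (by omega) hb1.2 hlt

-- Python's modinv returns None for a negative modulus
theorem pvModinvNeg (a p : Int) (hp : p < 0) : modinv a p = none := by
  unfold modinv
  rw [if_neg (by omega : ¬ p = 1)]
  have h1 := PySem.Int.mod_neg_bounds a hp
  have : (extGcd (PySem.Int.mod a p) p).1 < 0 :=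
    pvExtGcdNeg (PySem.Int.mod a p).natAbs _ p le_rfl h1.2 hp
  rw [if_pos (by omega : ¬ (extGcd (PySem.Int.mod a p) p).1 = 1)]

-- Python's modinv 3 p returns None for a positive multiple of 3
theorem pvModinvThree (p : Int) (hp : 0 < p) (hdvd : 3 ∣ p) (h1 : p ≠ 1) : modinv 3 p = none := by
  have hp3 : 3 ≤ p := by omega
  unfold modinv
  rw [if_neg h1]
  rcases eq_or_lt_of_le hp3 with h3 | h3
  · have hm : PySem.Int.mod 3 p = 0 := by
      rw [← h3, PySem.Int.mod_of_nonneg 3 (by omega)]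
      decide
    rw [hm, extGcd, dif_pos rfl]
    simp [← h3]
  · have hm : PySem.Int.mod 3 p = 3 := by
      rw [PySem.Int.mod_of_nonneg 3 (by omega)]
      exact Int.emod_eq_of_lt (by omega) h3
    have hm2 : PySem.Int.mod p 3 = 0 := by
      rw [PySem.Int.mod_of_nonneg p (by omega)]
      omega
    rw [hm, extGcd, dif_neg (by omega : ¬ (3:Int) = 0), hm2, extGcd, dif_pos rfl]
    norm_num

-- ===== VERDICT (by name: the statement is the Claim_ definition above) =====
theorem compute_sigma_g_form_spec : Claim_equal_compute_sigma_g_form := by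
  intro A_seq k p _ hpre
  obtain ⟨hp, hrest⟩ := hpre
  show compute_sigma_g_form A_seq k p = compute_sigma_g_form_alt A_seq k p
  rcases hrest with hneg | ⟨hdvd, h1⟩ | ⟨hk, hA⟩
  · unfold compute_sigma_g_form compute_sigma_g_form_alt
    rw [pvModinvNeg 3 p hneg]
  · rcases lt_or_gt_of_ne hp with hneg | hpos
    · unfold compute_sigma_g_form compute_sigma_g_form_alt
      rw [pvModinvNeg 3 p hneg]
    · unfold compute_sigma_g_form compute_sigma_g_form_alt
      rw [pvModinvThree p hpos hdvd h1]
  · unfold compute_sigma_g_form compute_sigma_g_form_alt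
    cases modinv 3 p with
    | none => rfl
    | some inv3 =>
      simp only []
      congr 1
      by_cases hk0 : k ≤ 0
      · rw [pvRangeNonpos hk0]; simp
      · have hkk : k = ((k.toNat : Nat) : Int) := (Int.toNat_of_nonneg (by omega)).symm
        rw [hkk, PySem.List.pyRange_zero_natCast, List.foldl_map, List.foldl_map]
        exact ((pvLoopInv A_seq p inv3 k.toNat hA).1).symm
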